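-- pv_equiv track=rewrite | github.com/vladislavligorskij27-crypto/mifyn_bot | myfin.py | get_cities_keyboard
-- ===== SOURCE A (Python) =====
-- REGIONS = {
--     "minsk_reg": {
--         "name": "Минск и область",
--         "cities": {"minsk": "Минск", "borisov": "Борисов", "soligorsk": "Солигорск", "molodechno": "Молодечно", "zhodino": "Жодино", "slutsk": "Слуцк"}
--     },
--     "brest_reg": {
--         "name": "Брестская обл.",
--         "cities": {"brest": "Брест", "baranovichi": "Барановичи", "pinsk": "Пинск", "kobrin": "Кобрин", "bereza": "Береза"}
--     },
--     "vitebsk_reg": {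
--         "name": "Витебская обл.",
--         "cities": {"vitebsk": "Витебск", "orsha": "Орша", "novopolotsk": "Новополоцк", "polotsk": "Полоцк", "postavy": "Поставы"}
--     },
--     "gomel_reg": {
--         "name": "Гомельская обл.",
--         "cities": {"gomel": "Гомель", "mozyr": "Мозырь", "zhlobin": "Жлобин", "rechitsa": "Речица", "svetlogorsk": "Светлогорск"}
--     },
--     "grodno_reg": {
--         "name": "Гродненская обл.",
--         "cities": {"grodno": "Гродно", "lida": "Лида", "volkovysk": "Волковыск", "smorgon": "Сморгонь", "slonim": "Слоним"}
--     },
--     "mogilev_reg": {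
--         "name": "Могилевская обл.",
--         "cities": {"mogilev": "Могилев", "bobruisk": "Бобруйск", "gorki": "Горки", "osipovichi": "Осиповичи", "krichev": "Кричев"}
--     }
-- }
--
-- def get_cities_keyboard(region_code: str) -> dict:
--     keyboard = []
--     row = []
--     cities = REGIONS.get(region_code, REGIONS["minsk_reg"])["cities"]
--     for city_code, city_name in cities.items():
--         row.append({"text": city_name, "callback_data": f"cit_{city_code}"})
--         if len(row) == 2:
--             keyboard.append(row)
--             row = []
--     if row: keyboard.append(row)
--     keyboard.append([{"text": "🔙 К областям", "callback_data": "menu_rates"}])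
--     return {"inline_keyboard": keyboard}
-- ===== SOURCE B (Python) =====
-- REGIONS = {
--     "minsk_reg": {
--         "name": "Минск и область",
--         "cities": {"minsk": "Минск", "borisov": "Борисов", "soligorsk": "Солигорск", "molodechno": "Молодечно", "zhodino": "Жодино", "slutsk": "Слуцк"}
--     },
--     "brest_reg": {
--         "name": "Брестская обл.",
--         "cities": {"brest": "Брест", "baranovichi": "Барановичи", "pinsk": "Пинск", "kobrin": "Кобрин", "bereza": "Береза"}
--     },
--     "vitebsk_reg": {
--         "name": "Витебская обл.",
--         "cities": {"vitebsk": "Витебск", "orsha": "Орша", "novopolotsk": "Новополоцк", "polotsk": "Полоцк", "postavy": "Поставы"}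
--     },
--     "gomel_reg": {
--         "name": "Гомельская обл.",
--         "cities": {"gomel": "Гомель", "mozyr": "Мозырь", "zhlobin": "Жлобин", "rechitsa": "Речица", "svetlogorsk": "Светлогорск"}
--     },
--     "grodno_reg": {
--         "name": "Гродненская обл.",
--         "cities": {"grodno": "Гродно", "lida": "Лида", "volkovysk": "Волковыск", "smorgon": "Сморгонь", "slonim": "Слоним"}
--     },
--     "mogilev_reg": {
--         "name": "Могилевская обл.",
--         "cities": {"mogilev": "Могилев", "bobruisk": "Бобруйск", "gorki": "Горки", "osipovichi": "Осиповичи", "krichev": "Кричев"}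
--     }
-- }
--
-- def _button(code, name):
--     return {"text": name, "callback_data": f"cit_{code}"}
--
-- def _pair_rows(items):
--     # structural recursion: take cities two at a time; a lone trailing city makes a row of one
--     if not items:
--         return []
--     if len(items) == 1:
--         return [[_button(*items[0])]]
--     first, second = items[0], items[1]
--     return [[_button(*first), _button(*second)]] + _pair_rows(items[2:])
--
-- def get_cities_keyboard(region_code: str) -> dict:
--     cities = REGIONS.get(region_code, REGIONS["minsk_reg"])["cities"]
--     rows = _pair_rows(list(cities.items()))
--     return {"inline_keyboard": rows + [[{"text": "🔙 К областям", "callback_data": "menu_rates"}]]}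
-- ===== Notes on version B (the rewrite author's own statement) =====
-- stated objective: alternative
-- what changed: Replaces A's single-pass accumulate-and-flush (a mutable row buffer flushed into the keyboard at length 2, plus a trailing flush) by a structural recursion that consumes the city list two entries at a time, emitting each completed row directly and a singleton row for a lone trailing city.
import Mathlib
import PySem

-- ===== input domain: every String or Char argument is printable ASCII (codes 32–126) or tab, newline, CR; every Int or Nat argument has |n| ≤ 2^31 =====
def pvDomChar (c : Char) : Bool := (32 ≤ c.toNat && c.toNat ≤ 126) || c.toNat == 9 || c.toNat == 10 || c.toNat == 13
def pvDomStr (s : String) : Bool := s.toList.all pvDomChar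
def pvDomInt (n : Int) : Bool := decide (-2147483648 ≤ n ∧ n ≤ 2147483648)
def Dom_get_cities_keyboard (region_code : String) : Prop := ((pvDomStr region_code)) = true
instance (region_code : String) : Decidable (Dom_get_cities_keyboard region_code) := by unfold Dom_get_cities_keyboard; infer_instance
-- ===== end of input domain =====

-- B replaces A's accumulate-and-flush row buffer by a structural recursion that takes
-- the city entries two at a time (alternative decomposition, same values).

-- shared module-level constant REGIONS (both Pythons use the same module table)
def pvMinskCities : PySem.Dict String String := PySem.Dict.ofList
  [("minsk", "Минск"), ("borisov", "Борисов"), ("soligorsk", "Солигорск"),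
   ("molodechno", "Молодечно"), ("zhodino", "Жодино"), ("slutsk", "Слуцк")]
def pvBrestCities : PySem.Dict String String := PySem.Dict.ofList
  [("brest", "Брест"), ("baranovichi", "Барановичи"), ("pinsk", "Пинск"),
   ("kobrin", "Кобрин"), ("bereza", "Береза")]
def pvVitebskCities : PySem.Dict String String := PySem.Dict.ofList
  [("vitebsk", "Витебск"), ("orsha", "Орша"), ("novopolotsk", "Новополоцк"),
   ("polotsk", "Полоцк"), ("postavy", "Поставы")]
def pvGomelCities : PySem.Dict String String := PySem.Dict.ofList
  [("gomel", "Гомель"), ("mozyr", "Мозырь"), ("zhlobin", "Жлобин"),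
   ("rechitsa", "Речица"), ("svetlogorsk", "Светлогорск")]
def pvGrodnoCities : PySem.Dict String String := PySem.Dict.ofList
  [("grodno", "Гродно"), ("lida", "Лида"), ("volkovysk", "Волковыск"),
   ("smorgon", "Сморгонь"), ("slonim", "Слоним")]
def pvMogilevCities : PySem.Dict String String := PySem.Dict.ofList
  [("mogilev", "Могилев"), ("bobruisk", "Бобруйск"), ("gorki", "Горки"),
   ("osipovichi", "Осиповичи"), ("krichev", "Кричев")]
-- region value = ("name", cities-dict); only ["cities"] (the .2) is read by the function
def pvREGIONS : PySem.Dict String (String × PySem.Dict String String) := PySem.Dict.ofList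
  [("minsk_reg", ("Минск и область", pvMinskCities)),
   ("brest_reg", ("Брестская обл.", pvBrestCities)),
   ("vitebsk_reg", ("Витебская обл.", pvVitebskCities)),
   ("gomel_reg", ("Гомельская обл.", pvGomelCities)),
   ("grodno_reg", ("Гродненская обл.", pvGrodnoCities)),
   ("mogilev_reg", ("Могилевская обл.", pvMogilevCities))]

-- ===== PORT A =====
-- A's loop state: (keyboard so far, current row); flush row when it reaches length 2
def pvLoopA (cs : List (String × String)) :
    List (List (List (String × String))) × List (List (String × String)) :=
  cs.foldl
    (fun st kv =>
      let row := st.2 ++ [[("text", kv.2), ("callback_data", "cit_" ++ kv.1)]]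
      if row.length == 2 then (st.1 ++ [row], []) else (st.1, row))
    ([], [])

def get_cities_keyboard (region_code : String) : List (String × List (List (List (String × String)))) :=
  let cities := (PySem.Dict.getD pvREGIONS region_code ("Минск и область", pvMinskCities)).2
  let st := pvLoopA cities.items
  let keyboard := if st.2 ≠ [] then st.1 ++ [st.2] else st.1
  let keyboard := keyboard ++ [[[("text", "🔙 К областям"), ("callback_data", "menu_rates")]]]
  [("inline_keyboard", keyboard)]

-- ===== PORT B =====
def pvButton (kv : String × String) : List (String × String) :=
  [("text", kv.2), ("callback_data", "cit_" ++ kv.1)]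

-- B's helper _pair_rows: structural recursion, two entries per step
def pvPairRows : List (String × String) → List (List (List (String × String)))
  | [] => []
  | [kv] => [[pvButton kv]]
  | a :: b :: rest => [pvButton a, pvButton b] :: pvPairRows rest

def get_cities_keyboard_alt (region_code : String) : List (String × List (List (List (String × String)))) :=
  let cities := (PySem.Dict.getD pvREGIONS region_code ("Минск и область", pvMinskCities)).2
  let rows := pvPairRows cities.items
  [("inline_keyboard", rows ++ [[[("text", "🔙 К областям"), ("callback_data", "menu_rates")]]])]

-- ===== PRECONDITION & SPEC =====
def Spec_get_cities_keyboard (region_code : String) (out : List (String × List (List (List (String × String))))) : Prop := out = get_cities_keyboard_alt region_code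
instance (region_code : String) (out : List (String × List (List (List (String × String))))) : Decidable (Spec_get_cities_keyboard region_code out) := by unfold Spec_get_cities_keyboard; infer_instance

-- ===== CLAIM (what is proved, stated in full; the proofs are below) =====
def Claim_equal_get_cities_keyboard : Prop := ∀ (region_code : String), Dom_get_cities_keyboard region_code → Spec_get_cities_keyboard region_code (get_cities_keyboard region_code)

-- ===== LEMMAS AND PROOFS =====

-- the lookup can only produce one of the six city tables (an unknown key falls back to minsk)
lemma pv_cities_cases (rc : String) :
    (PySem.Dict.getD pvREGIONS rc ("Минск и область", pvMinskCities)).2 = pvMinskCities ∨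
    (PySem.Dict.getD pvREGIONS rc ("Минск и область", pvMinskCities)).2 = pvBrestCities ∨
    (PySem.Dict.getD pvREGIONS rc ("Минск и область", pvMinskCities)).2 = pvVitebskCities ∨
    (PySem.Dict.getD pvREGIONS rc ("Минск и область", pvMinskCities)).2 = pvGomelCities ∨
    (PySem.Dict.getD pvREGIONS rc ("Минск и область", pvMinskCities)).2 = pvGrodnoCities ∨
    (PySem.Dict.getD pvREGIONS rc ("Минск и область", pvMinskCities)).2 = pvMogilevCities := by
  have hd : pvREGIONS = PySem.Dict.mk
      [("minsk_reg", ("Минск и область", pvMinskCities)),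
       ("brest_reg", ("Брестская обл.", pvBrestCities)),
       ("vitebsk_reg", ("Витебская обл.", pvVitebskCities)),
       ("gomel_reg", ("Гомельская обл.", pvGomelCities)),
       ("grodno_reg", ("Гродненская обл.", pvGrodnoCities)),
       ("mogilev_reg", ("Могилевская обл.", pvMogilevCities))] := by decide
  rw [hd, PySem.Dict.getD_eq_get?_getD]
  simp only [PySem.Dict.get?_mk_cons]
  split_ifs <;> simp [PySem.Dict.get?]

-- ===== VERDICT (by name: the statement is the Claim_ definition above) =====
theorem get_cities_keyboard_spec : Claim_equal_get_cities_keyboard := by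
  intro rc _
  unfold Spec_get_cities_keyboard get_cities_keyboard get_cities_keyboard_alt
  rcases pv_cities_cases rc with h | h | h | h | h | h <;> rw [h] <;> decide
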